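-- pv_equiv track=rewrite | github.com/natanayalo/SeenemAll | api/core/legacy_intent_parser.py | _extract_moods
-- ===== SOURCE A (Python) =====
-- from typing import Any, Dict, Iterable, List, Optional, Sequence
--
-- _MOOD_SYNONYMS: dict[str, Sequence[str]] = {
--     "light": (
--         "light",
--         "uplifting",
--         "wholesome",
--         "feel good",
--         "feel-good",
--         "heartwarming",
--     ),
--     "dark": ("dark", "gritty", "bleak", "brooding"),
--     "funny": ("funny", "hilarious", "comedic", "witty"),
--     "romantic": ("romantic", "date night", "love story", "lovey"),
--     "scary": ("scary", "spooky", "terrifying", "creepy"),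
--     "exciting": (
--         "exciting",
--         "thrilling",
--         "adrenaline",
--         "action packed",
--         "action-packed",
--     ),
-- }
--
-- def _extract_moods(normalized_text: str) -> List[str]:
--     if not normalized_text:
--         return []
--     padded = f" {normalized_text} "
--     moods: List[str] = []
--     for mood, keywords in _MOOD_SYNONYMS.items():
--         for keyword in keywords:
--             token = f" {keyword} "
--             if token in padded:
--                 moods.append(mood)
--                 break
--     return moods
-- ===== SOURCE B (Python) =====
-- from typing import Any, Dict, Iterable, List, Optional, Sequence
--
-- _MOOD_SYNONYMS: dict[str, Sequence[str]] = {
--     "light": (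
--         "light",
--         "uplifting",
--         "wholesome",
--         "feel good",
--         "feel-good",
--         "heartwarming",
--     ),
--     "dark": ("dark", "gritty", "bleak", "brooding"),
--     "funny": ("funny", "hilarious", "comedic", "witty"),
--     "romantic": ("romantic", "date night", "love story", "lovey"),
--     "scary": ("scary", "spooky", "terrifying", "creepy"),
--     "exciting": (
--         "exciting",
--         "thrilling",
--         "adrenaline",
--         "action packed",
--         "action-packed",
--     ),
-- }
--
-- # Inverted index: one flat list of (keyword, mood) pairs.
-- _KEYWORD_TO_MOOD: List[tuple] = [
--     (keyword, mood)
--     for mood, keywords in _MOOD_SYNONYMS.items()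
--     for keyword in keywords
-- ]
--
--
-- def _extract_moods(normalized_text: str) -> List[str]:
--     if not normalized_text:
--         return []
--     padded = f" {normalized_text} "
--     found = {mood for keyword, mood in _KEYWORD_TO_MOOD if f" {keyword} " in padded}
--     return [mood for mood in _MOOD_SYNONYMS if mood in found]
-- ===== Notes on version B (the rewrite author's own statement) =====
-- stated objective: alternative
-- what changed: Replaces the nested mood-by-mood keyword scan with its per-mood break by a single flat pass over an inverted (keyword, mood) index collecting hits into a set, followed by an order-preserving filter over the mood table.
import Mathlib
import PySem

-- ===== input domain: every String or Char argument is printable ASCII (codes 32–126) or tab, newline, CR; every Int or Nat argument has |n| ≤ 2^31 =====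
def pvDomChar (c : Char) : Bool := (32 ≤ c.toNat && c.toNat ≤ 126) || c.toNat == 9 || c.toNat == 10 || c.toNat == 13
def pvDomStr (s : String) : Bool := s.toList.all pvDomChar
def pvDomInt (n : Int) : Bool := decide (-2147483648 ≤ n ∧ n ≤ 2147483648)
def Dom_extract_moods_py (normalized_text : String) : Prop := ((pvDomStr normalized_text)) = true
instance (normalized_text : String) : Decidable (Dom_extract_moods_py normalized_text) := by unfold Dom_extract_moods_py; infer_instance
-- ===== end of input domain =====

-- B replaces A's nested mood×keyword scan (with per-mood break) by one flat pass over an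
-- inverted (keyword, mood) list collecting hits into a set, then filters the mood table; alternative decomposition, same cost.

-- the module-level table _MOOD_SYNONYMS, in dict insertion order
def pvMoodSynonyms : List (String × List String) :=
  [ ("light", ["light", "uplifting", "wholesome", "feel good", "feel-good", "heartwarming"]),
    ("dark", ["dark", "gritty", "bleak", "brooding"]),
    ("funny", ["funny", "hilarious", "comedic", "witty"]),
    ("romantic", ["romantic", "date night", "love story", "lovey"]),
    ("scary", ["scary", "spooky", "terrifying", "creepy"]),
    ("exciting", ["exciting", "thrilling", "adrenaline", "action packed", "action-packed"]) ]

-- ===== PORT A =====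
-- inner 'for keyword in keywords: … break' — returns true as soon as one padded keyword occurs
def pvA_scanKeywords (padded : String) (keywords : List String) : Bool :=
  match keywords with
  | [] => false
  | kw :: rest =>
      if PySem.Str.isIn (" " ++ kw ++ " ") padded then true else pvA_scanKeywords padded rest

def extract_moods_py (normalized_text : String) : List String :=
  if normalized_text = "" then []
  else
    let padded := " " ++ normalized_text ++ " "
    pvMoodSynonyms.foldl
      (fun moods p => if pvA_scanKeywords padded p.2 then moods ++ [p.1] else moods) []

-- ===== PORT B =====
-- _KEYWORD_TO_MOOD: the flattening comprehension
def pvB_keywordToMood : List (String × String) :=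
  pvMoodSynonyms.flatMap (fun p => p.2.map (fun kw => (kw, p.1)))

def extract_moods_py_alt (normalized_text : String) : List String :=
  if normalized_text = "" then []
  else
    let padded := " " ++ normalized_text ++ " "
    let found : PySem.Set String :=
      PySem.Set.ofList
        (((pvB_keywordToMood.filter (fun q => PySem.Str.isIn (" " ++ q.1 ++ " ") padded)).map
          Prod.snd))
    (pvMoodSynonyms.map Prod.fst).filter (fun mood => found.contains mood)

-- ===== PRECONDITION & SPEC =====
def Spec_extract_moods_py (normalized_text : String) (out : List String) : Prop := out = extract_moods_py_alt normalized_text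
instance (normalized_text : String) (out : List String) : Decidable (Spec_extract_moods_py normalized_text out) := by unfold Spec_extract_moods_py; infer_instance

-- ===== CLAIM (what is proved, stated in full; the proofs are below) =====
def Claim_equal_extract_moods_py : Prop := ∀ (normalized_text : String), Dom_extract_moods_py normalized_text → Spec_extract_moods_py normalized_text (extract_moods_py normalized_text)

-- ===== LEMMAS AND PROOFS =====

-- A's break-scan is List.any of the padded-membership test
theorem pvA_scanKeywords_eq_any (padded : String) (kws : List String) :
    pvA_scanKeywords padded kws = kws.any (fun kw => PySem.Str.isIn (" " ++ kw ++ " ") padded) := by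
  induction kws with
  | nil => rfl
  | cons kw rest ih => simp [pvA_scanKeywords, ih]

theorem pv_contains_ofList (L : List String) (m : String) :
    (PySem.Set.ofList L).contains m = L.contains m := by
  rw [Bool.eq_iff_iff]
  simp [PySem.Set.mem_ofList]

theorem pv_contains_map_snd_filter (q : String × String → Bool) (l : List (String × String))
    (m : String) :
    ((l.filter q).map Prod.snd).contains m = l.any (fun x => q x && x.2 == m) := by
  rw [List.contains_eq_any_beq, List.any_map, List.any_filter]
  congr 1
  funext x
  cases hq : q x
  · simp
  · rw [Bool.eq_iff_iff]
    simp only [Function.comp_apply, Bool.true_and, beq_iff_eq]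
    exact eq_comm

set_option maxHeartbeats 4000000 in
theorem extract_moods_eq (padded : String) :
    pvMoodSynonyms.foldl
      (fun moods p => if pvA_scanKeywords padded p.2 then moods ++ [p.1] else moods) [] =
    (pvMoodSynonyms.map Prod.fst).filter (fun mood =>
      (PySem.Set.ofList
        (((pvB_keywordToMood.filter (fun q => PySem.Str.isIn (" " ++ q.1 ++ " ") padded)).map
          Prod.snd))).contains mood) := by
  simp only [pvA_scanKeywords_eq_any, pv_contains_ofList, pv_contains_map_snd_filter]
  simp [pvMoodSynonyms, pvB_keywordToMood]
  split_ifs <;> first | rfl | simp_all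

-- ===== VERDICT (by name: the statement is the Claim_ definition above) =====
theorem extract_moods_py_spec : Claim_equal_extract_moods_py := by
  intro t _
  unfold Spec_extract_moods_py extract_moods_py extract_moods_py_alt
  split_ifs with h
  · rfl
  · exact extract_moods_eq _
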